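-- pv_equiv track=rewrite | github.com/diothor/dcp-python | problems/problem_316.py | coins_in_use
-- ===== SOURCE A (Python) =====
-- def coins_in_use(change_ways: list, coin=1, in_use=None) -> list:
--     n = len(change_ways)
--     if in_use is None:
--         in_use = []
--
--     if coin == n:
--         return in_use
--
--     needed = change_ways[coin]
--     for used in in_use:
--         needed -= change_ways[coin - used]
--
--     if needed:
--         in_use.append(coin)
--     return coins_in_use(change_ways, coin + 1, in_use)
-- ===== SOURCE B (Python) =====
-- def coins_in_use(change_ways: list, coin=1, in_use=None) -> list:
--     if in_use is None:
--         in_use = []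
--     for c in range(coin, len(change_ways)):
--         needed = change_ways[c] - sum(change_ways[c - u] for u in in_use)
--         if needed:
--             in_use.append(c)
--     return in_use
-- ===== Notes on version B (the rewrite author's own statement) =====
-- stated objective: simpler
-- what changed: B replaces A's tail recursion (re-checking coin==n each call and mutating needed in an inner for-subtract loop) with a single for-loop over range(coin, n) that computes needed as change_ways[c] minus a sum() over in_use.
-- outside the precondition, e.g. on coins_in_use([0, 0], -1, None): A returns [], B returns []; on coins_in_use([0, 0], -2, None): A returns [], B returns []
-- crash fix: When coin > len(change_ways), A raises IndexError at change_ways[coin] while B's empty range makes it return in_use (or []) unchanged. — e.g. on coins_in_use([7], 3, none): A raises IndexError, B returns []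
import Mathlib
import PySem

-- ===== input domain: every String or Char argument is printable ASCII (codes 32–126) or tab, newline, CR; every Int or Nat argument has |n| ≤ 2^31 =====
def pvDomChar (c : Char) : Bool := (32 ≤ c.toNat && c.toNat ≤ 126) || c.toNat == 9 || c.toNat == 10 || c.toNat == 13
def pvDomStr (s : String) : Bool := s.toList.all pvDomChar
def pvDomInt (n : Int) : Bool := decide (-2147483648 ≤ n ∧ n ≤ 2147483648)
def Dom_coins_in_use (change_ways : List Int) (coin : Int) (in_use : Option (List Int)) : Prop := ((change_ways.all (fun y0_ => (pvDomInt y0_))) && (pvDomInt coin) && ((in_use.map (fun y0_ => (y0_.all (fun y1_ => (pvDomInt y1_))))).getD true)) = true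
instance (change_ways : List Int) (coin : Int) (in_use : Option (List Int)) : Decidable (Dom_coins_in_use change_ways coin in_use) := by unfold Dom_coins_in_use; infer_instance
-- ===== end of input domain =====

-- B replaces A's tail recursion with one for-loop over range(coin, n) using sum() for `needed` (objective: simpler).
-- Both A and B append to the caller's in_use list in place; the equivalence proved here is about the return value.

-- ===== PORT A =====
-- fuel = number of remaining recursive steps; under Pre_ it is exactly n - coin, so fuel 0 is the coin == n base case
def coinsInUseGoA (cw : List Int) (n : Int) (coin : Int) (iu : List Int) (fuel : Nat) : List Int :=
  match fuel with
  | 0 => iu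
  | Nat.succ f =>
    if coin = n then iu
    else
      let needed := iu.foldl (fun acc u => acc - PySem.List.pyGetD cw (coin - u) 0) (PySem.List.pyGetD cw coin 0)
      let iu' := if needed ≠ 0 then iu ++ [coin] else iu
      coinsInUseGoA cw n (coin + 1) iu' f

def coins_in_use (change_ways : List Int) (coin : Int) (in_use : Option (List Int)) : List Int :=
  let iu := match in_use with | none => [] | some l => l
  coinsInUseGoA change_ways (change_ways.length : Int) coin iu (((change_ways.length : Int) - coin).toNat)

-- ===== PORT B =====
def coins_in_use_alt (change_ways : List Int) (coin : Int) (in_use : Option (List Int)) : List Int :=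
  let iu0 := match in_use with | none => [] | some l => l
  (PySem.List.pyRange coin (change_ways.length : Int) 1).foldl
    (fun iu c =>
      let needed := PySem.List.pyGetD change_ways c 0
        - (iu.map (fun u => PySem.List.pyGetD change_ways (c - u) 0)).sum
      if needed ≠ 0 then iu ++ [c] else iu) iu0

-- ===== PRECONDITION & SPEC =====
-- For coin ≥ 0 this is EXACTLY the set of inputs on which A returns (every index A touches stays in
-- Python's [-n, n) range, wraparound included); Pre_ additionally excludes negative start coins, where
-- A returning or raising depends on the list's values (an appended negative coin shifts later indices
-- out of range) and so has no closed form — where A does return there, B returns the same list.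
def Pre_coins_in_use (change_ways : List Int) (coin : Int) (in_use : Option (List Int)) : Prop :=
  coin = (change_ways.length : Int) ∨
    (0 ≤ coin ∧ coin < (change_ways.length : Int) ∧
      ∀ u ∈ (match in_use with | none => ([] : List Int) | some l => l),
        0 ≤ u ∧ u ≤ coin + (change_ways.length : Int))
instance (change_ways : List Int) (coin : Int) (in_use : Option (List Int)) : Decidable (Pre_coins_in_use change_ways coin in_use) := by unfold Pre_coins_in_use; infer_instance
def pvWitness_coins_in_use : List Int × Int × Option (List Int) := ([1, 1, 2], 1, none)

-- When coin > len(change_ways), A raises IndexError at change_ways[coin] while B's empty range makes it return in_use (or []) unchanged.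
def Raises_coins_in_use (change_ways : List Int) (coin : Int) (in_use : Option (List Int)) : Prop :=
  (change_ways.length : Int) < coin
instance (change_ways : List Int) (coin : Int) (in_use : Option (List Int)) : Decidable (Raises_coins_in_use change_ways coin in_use) := by unfold Raises_coins_in_use; infer_instance
def pvRaiseWitness_coins_in_use : List Int × Int × Option (List Int) := ([7], 3, none)
def pvRaiseWitnessOut_coins_in_use : List Int := []

def Spec_coins_in_use (change_ways : List Int) (coin : Int) (in_use : Option (List Int)) (out : List Int) : Prop := out = coins_in_use_alt change_ways coin in_use
instance (change_ways : List Int) (coin : Int) (in_use : Option (List Int)) (out : List Int) : Decidable (Spec_coins_in_use change_ways coin in_use out) := by unfold Spec_coins_in_use; infer_instance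

-- ===== CLAIM (what is proved, stated in full; the proofs are below) =====
def Claim_equal_coins_in_use : Prop := ∀ (change_ways : List Int) (coin : Int) (in_use : Option (List Int)), Dom_coins_in_use change_ways coin in_use → Pre_coins_in_use change_ways coin in_use → Spec_coins_in_use change_ways coin in_use (coins_in_use change_ways coin in_use)
def Claim_raises_coins_in_use : Prop := (∀ (change_ways : List Int) (coin : Int) (in_use : Option (List Int)), Dom_coins_in_use change_ways coin in_use → Raises_coins_in_use change_ways coin in_use → ¬ Pre_coins_in_use change_ways coin in_use) ∧ (Dom_coins_in_use (pvRaiseWitness_coins_in_use.1) (pvRaiseWitness_coins_in_use.2.1) (pvRaiseWitness_coins_in_use.2.2) ∧ Raises_coins_in_use (pvRaiseWitness_coins_in_use.1) (pvRaiseWitness_coins_in_use.2.1) (pvRaiseWitness_coins_in_use.2.2) ∧ coins_in_use_alt (pvRaiseWitness_coins_in_use.1) (pvRaiseWitness_coins_in_use.2.1) (pvRaiseWitness_coins_in_use.2.2) = pvRaiseWitnessOut_coins_in_use)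

-- ===== LEMMAS AND PROOFS =====

-- A's inner for-subtract loop equals "initial value minus the sum of the mapped list"
theorem foldl_sub_eq_sub_sum (g : Int → Int) (l : List Int) (init : Int) :
    l.foldl (fun acc u => acc - g u) init = init - (l.map g).sum := by
  induction l generalizing init with
  | nil => simp
  | cons h t ih => simp [List.foldl_cons, ih (init - g h)]; ring

-- the fueled recursion of A's port equals B's fold over range(coin, n)
theorem goA_eq_foldl (cw : List Int) (k : Nat) : ∀ (coin : Int) (iu : List Int),
    coin + (k : Int) = (cw.length : Int) →
    coinsInUseGoA cw (cw.length : Int) coin iu k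
      = (PySem.List.pyRange coin (cw.length : Int) 1).foldl
          (fun iu c =>
            let needed := PySem.List.pyGetD cw c 0
              - (iu.map (fun u => PySem.List.pyGetD cw (c - u) 0)).sum
            if needed ≠ 0 then iu ++ [c] else iu) iu := by
  induction k with
  | zero =>
    intro coin iu h
    rw [PySem.List.pyRange_one_eq_nil (by omega)]
    rfl
  | succ f ih =>
    intro coin iu h
    have hlt : coin < (cw.length : Int) := by push_cast at h ⊢; omega
    rw [PySem.List.pyRange_one_cons hlt, List.foldl_cons]
    show (if coin = (cw.length : Int) then iu
          else coinsInUseGoA cw (cw.length : Int) (coin + 1)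
            (if iu.foldl (fun acc u => acc - PySem.List.pyGetD cw (coin - u) 0) (PySem.List.pyGetD cw coin 0) ≠ 0
             then iu ++ [coin] else iu) f) = _
    rw [if_neg (by omega), foldl_sub_eq_sub_sum]
    rw [ih (coin + 1) _ (by push_cast at h ⊢; omega)]

-- ===== VERDICT (by name: the statement is the Claim_ definition above) =====
theorem coins_in_use_spec : Claim_equal_coins_in_use := by
  intro cw coin in_use _hD hPre
  unfold Spec_coins_in_use coins_in_use coins_in_use_alt
  have hle : coin ≤ (cw.length : Int) := by
    rcases hPre with h | ⟨_, h, _⟩ <;> omega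
  exact goA_eq_foldl cw (((cw.length : Int) - coin).toNat) coin _ (by omega)

@[simp] theorem coins_in_use_raises : Claim_raises_coins_in_use := by
  unfold Claim_raises_coins_in_use
  refine ⟨?_, by decide⟩
  intro cw coin in_use _hD hR hPre
  unfold Raises_coins_in_use at hR
  rcases hPre with h | ⟨_, h, _⟩ <;> omega
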